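-- pv_equiv track=rewrite | github.com/boseongkang/newstrend | scripts/backtest.py | mask_news_lead_ta
-- ===== SOURCE A (Python) =====
-- def mask_news_lead_ta(records: list,
--                       news_mask: list,
--                       ta_mask: list,
--                       lead_window: int = 3) -> list:
--     """
--     뉴스 신호가 발생한 후 lead_window일 내에 TA 신호가 확인되면 진입.
--     """
--     n   = len(records)
--     out = [False] * n
--     for i in range(n):
--         if not news_mask[i]:
--             continue
--         # lead_window일 안에 TA 신호 있는지 확인
--         for j in range(i, min(i + lead_window + 1, n)):
--             if ta_mask[j]:
--                 out[j] = True
--                 break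
--     return out
-- ===== SOURCE B (Python) =====
-- def mask_news_lead_ta(records: list,
--                       news_mask: list,
--                       ta_mask: list,
--                       lead_window: int = 3) -> list:
--     """Precompute, back to front, the next TA index at or after each position;
--     then each news signal needs only a single window check."""
--     n = len(records)
--     # nxt[i] = smallest j >= i with ta_mask[j] (j < n), else n
--     nxt = [n] * (n + 1)
--     for i in range(n - 1, -1, -1):
--         nxt[i] = i if ta_mask[i] else nxt[i + 1]
--     out = [False] * n
--     for i in range(n):
--         if news_mask[i]:
--             j = nxt[i]
--             if j < n and j - i <= lead_window:
--                 out[j] = True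
--     return out
-- ===== Notes on version B (the rewrite author's own statement) =====
-- stated objective: alternative
-- what changed: Replaced A's per-news-signal forward window scan by a single backward pass that precomputes the next TA index at or after every position, which each news signal then just looks up.
-- outside the precondition, e.g. on mask_news_lead_ta([0], [False], [], 3): A returns [False], B raises IndexError
import Mathlib
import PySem

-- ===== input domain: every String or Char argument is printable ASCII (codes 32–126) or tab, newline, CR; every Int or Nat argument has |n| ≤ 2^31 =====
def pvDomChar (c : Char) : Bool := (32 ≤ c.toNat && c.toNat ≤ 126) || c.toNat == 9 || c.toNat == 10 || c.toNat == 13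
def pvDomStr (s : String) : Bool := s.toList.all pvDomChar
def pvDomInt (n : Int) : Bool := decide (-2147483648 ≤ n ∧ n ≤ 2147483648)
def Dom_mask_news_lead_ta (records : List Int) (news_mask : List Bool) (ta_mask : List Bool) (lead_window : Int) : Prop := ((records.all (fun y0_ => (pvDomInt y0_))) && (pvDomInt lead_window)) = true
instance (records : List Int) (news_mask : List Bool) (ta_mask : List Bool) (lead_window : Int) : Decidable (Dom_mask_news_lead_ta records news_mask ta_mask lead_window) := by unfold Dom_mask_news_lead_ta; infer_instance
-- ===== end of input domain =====

-- B replaces A's per-news-signal inner window scan by one backward pass precomputing the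
-- next TA index at or after each position, looked up per news signal (alternative algorithm).


-- ===== PORT A =====
-- A's inner loop 'for j in range(i, min(i+lead_window+1, n)): if ta_mask[j]: out[j]=True; break'
def pvInnerA (ta_mask : List Bool) (out : List Bool) : List Nat → List Bool
  | [] => out
  | j :: rest => if ta_mask.getD j false then out.set j true else pvInnerA ta_mask out rest

def mask_news_lead_ta (records : List Int) (news_mask : List Bool) (ta_mask : List Bool) (lead_window : Int) : List Bool :=
  let n := records.length
  (List.range n).foldl (fun out i =>
    if news_mask.getD i false then
      pvInnerA ta_mask out (List.range' i ((min ((i : Int) + lead_window + 1) (n : Int) - (i : Int)).toNat))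
    else out) (List.replicate n false)

-- ===== PORT B =====
def mask_news_lead_ta_alt (records : List Int) (news_mask : List Bool) (ta_mask : List Bool) (lead_window : Int) : List Bool :=
  let n := records.length
  -- backward pass: nxt[i] = smallest j ≥ i with ta_mask[j] (j < n), else n; nxt has length n+1
  let nxt : List Nat := (List.range n).foldr
    (fun i acc => (if ta_mask.getD i false then i else acc.headD n) :: acc) [n]
  (List.range n).foldl (fun out i =>
    if news_mask.getD i false then
      let j := nxt.getD i n
      if j < n ∧ (j : Int) - (i : Int) ≤ lead_window then out.set j true else out
    else out) (List.replicate n false)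

-- ===== PRECONDITION & SPEC =====
-- Pre_ excludes inputs where a mask is shorter than records: there Python A raises IndexError
-- (except accidentally when no news window reaches the missing ta tail, where B still raises).
def Pre_mask_news_lead_ta (records : List Int) (news_mask : List Bool) (ta_mask : List Bool) (lead_window : Int) : Prop :=
  records.length ≤ news_mask.length ∧ records.length ≤ ta_mask.length
instance (records : List Int) (news_mask : List Bool) (ta_mask : List Bool) (lead_window : Int) : Decidable (Pre_mask_news_lead_ta records news_mask ta_mask lead_window) := by unfold Pre_mask_news_lead_ta; infer_instance

def pvWitness_mask_news_lead_ta : List Int × List Bool × List Bool × Int := ([1, 2, 3], [true, false, false], [false, true, false], 3)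

def Spec_mask_news_lead_ta (records : List Int) (news_mask : List Bool) (ta_mask : List Bool) (lead_window : Int) (out : List Bool) : Prop := out = mask_news_lead_ta_alt records news_mask ta_mask lead_window
instance (records : List Int) (news_mask : List Bool) (ta_mask : List Bool) (lead_window : Int) (out : List Bool) : Decidable (Spec_mask_news_lead_ta records news_mask ta_mask lead_window out) := by unfold Spec_mask_news_lead_ta; infer_instance

-- ===== CLAIM (what is proved, stated in full; the proofs are below) =====
def Claim_equal_mask_news_lead_ta : Prop := ∀ (records : List Int) (news_mask : List Bool) (ta_mask : List Bool) (lead_window : Int), Dom_mask_news_lead_ta records news_mask ta_mask lead_window → Pre_mask_news_lead_ta records news_mask ta_mask lead_window → Spec_mask_news_lead_ta records news_mask ta_mask lead_window (mask_news_lead_ta records news_mask ta_mask lead_window)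

-- ===== LEMMAS AND PROOFS =====

-- first j in [i, m) with ta_mask[j] true, else none
def pvFindUpTo (ta : List Bool) (m i : Nat) : Option Nat :=
  if h : i < m then (if ta.getD i false then some i else pvFindUpTo ta m (i + 1)) else none
  termination_by m - i

theorem pvFindUpTo_some_aux (ta : List Bool) (m : Nat) :
    ∀ k i j, m - i = k → pvFindUpTo ta m i = some j → i ≤ j ∧ j < m := by
  intro k
  induction k with
  | zero =>
      intro i j hk hj
      rw [pvFindUpTo, dif_neg (by omega : ¬ i < m)] at hj
      simp at hj
  | succ k ih =>
      intro i j hk hj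
      rw [pvFindUpTo, dif_pos (by omega : i < m)] at hj
      by_cases hta : ta.getD i false
      · rw [if_pos hta] at hj; simp at hj; omega
      · rw [if_neg hta] at hj
        have := ih (i + 1) j (by omega) hj; omega

theorem pvFindUpTo_some (ta : List Bool) (m i j : Nat)
    (h : pvFindUpTo ta m i = some j) : i ≤ j ∧ j < m :=
  pvFindUpTo_some_aux ta m (m - i) i j rfl h

theorem pvInnerA_eq (ta out : List Bool) :
    ∀ k i, pvInnerA ta out (List.range' i k) =
      (match pvFindUpTo ta (i + k) i with
       | some j => out.set j true
       | none => out) := by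
  intro k
  induction k with
  | zero => intro i; rw [pvFindUpTo]; simp [pvInnerA]
  | succ k ih =>
      intro i
      rw [List.range'_succ]
      conv_rhs => rw [pvFindUpTo]
      rw [dif_pos (by omega : i < i + (k + 1))]
      by_cases hta : ta.getD i false
      · show (if ta.getD i false then out.set i true else _) = _
        rw [if_pos hta, if_pos hta]
      · show (if ta.getD i false then out.set i true else _) = _
        rw [if_neg hta, if_neg hta]
        have := ih (i + 1)
        rw [show i + 1 + k = i + (k + 1) by omega] at this
        exact this

theorem pvFindUpTo_trunc (ta : List Bool) (n m : Nat) (hmn : m ≤ n) :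
    ∀ k i, n - i = k →
      pvFindUpTo ta m i =
        (match pvFindUpTo ta n i with
         | some j => if j < m then some j else none
         | none => none) := by
  intro k
  induction k with
  | zero =>
      intro i hk
      rw [pvFindUpTo, dif_neg (by omega : ¬ i < m)]
      rw [pvFindUpTo, dif_neg (by omega : ¬ i < n)]
  | succ k ih =>
      intro i hk
      by_cases him : i < m
      · conv_lhs => rw [pvFindUpTo]
        conv_rhs => rw [pvFindUpTo]
        rw [dif_pos him, dif_pos (by omega : i < n)]
        by_cases hta : ta.getD i false
        · rw [if_pos hta, if_pos hta]
          show _ = if i < m then some i else none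
          rw [if_pos him]
        · rw [if_neg hta, if_neg hta]
          exact ih (i + 1) (by omega)
      · rw [pvFindUpTo, dif_neg him]
        match hfi : pvFindUpTo ta n i with
        | some j =>
            have := pvFindUpTo_some ta n i j hfi
            simp only [if_neg (show ¬ j < m by omega)]
        | none => rfl

-- the value B's backward pass stores at position i
def pvNxt (ta : List Bool) (n i : Nat) : Nat := (pvFindUpTo ta n i).getD n

theorem pvNxt_ge (ta : List Bool) (n i : Nat) : i ≤ pvNxt ta n i ∨ pvNxt ta n i = n := by
  unfold pvNxt
  match h : pvFindUpTo ta n i with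
  | some j => left; exact (pvFindUpTo_some ta n i j h).1
  | none => right; rfl

theorem pvNxt_step (ta : List Bool) (n i : Nat) (hi : i < n) :
    pvNxt ta n i = if ta.getD i false then i else pvNxt ta n (i + 1) := by
  unfold pvNxt
  conv_lhs => rw [pvFindUpTo]
  rw [dif_pos hi]
  by_cases hta : ta.getD i false
  · rw [if_pos hta, if_pos hta]; rfl
  · rw [if_neg hta, if_neg hta]

theorem pvNxt_self (ta : List Bool) (n : Nat) : pvNxt ta n n = n := by
  unfold pvNxt
  rw [pvFindUpTo, dif_neg (by omega : ¬ n < n)]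
  rfl

theorem pvFoldr_nxt (ta : List Bool) (n : Nat) :
    ∀ k, k ≤ n →
      (List.range' (n - k) k).foldr
          (fun i acc => (if ta.getD i false then i else acc.headD n) :: acc) [n]
        = (List.range' (n - k) (k + 1)).map (pvNxt ta n) := by
  intro k
  induction k with
  | zero =>
      intro _
      simp [pvNxt_self]
  | succ k ih =>
      intro hk
      have h1 : n - (k + 1) + 1 = n - k := by omega
      rw [List.range'_succ, List.foldr_cons, h1, ih (by omega)]
      conv_rhs => rw [List.range'_succ]
      rw [List.map_cons, h1]
      congr 1
      rw [pvNxt_step ta n (n - (k + 1)) (by omega)]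
      by_cases hta : ta.getD (n - (k + 1)) false
      · rw [if_pos hta, if_pos hta]
      · rw [if_neg hta, if_neg hta]
        rw [List.range'_succ, List.map_cons, List.headD_cons, h1]

theorem pvNxt_lookup (ta : List Bool) (n i : Nat) (hi : i < n) :
    ((List.range n).foldr
        (fun i acc => (if ta.getD i false then i else acc.headD n) :: acc) [n]).getD i n
      = pvNxt ta n i := by
  have h := pvFoldr_nxt ta n n le_rfl
  rw [Nat.sub_self] at h
  rw [List.range_eq_range', h]
  rw [List.getD_eq_getElem _ _ (by simp; omega)]
  simp [List.getElem_range']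

-- the per-index step of A equals the per-index step of B
theorem pvStep_eq (ta out : List Bool) (lw : Int) (n i : Nat) (hi : i < n) :
    pvInnerA ta out (List.range' i ((min ((i : Int) + lw + 1) (n : Int) - (i : Int)).toNat))
      = (if pvNxt ta n i < n ∧ (pvNxt ta n i : Int) - (i : Int) ≤ lw
         then out.set (pvNxt ta n i) true else out) := by
  set mI : Int := min ((i : Int) + lw + 1) (n : Int) with hmI
  by_cases hle : mI ≤ (i : Int)
  · -- empty window on A's side; B's condition is false since nxt ≥ i forces nxt - i > lw
    have hk : (mI - (i : Int)).toNat = 0 := by omega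
    rw [hk]
    simp only [List.range', pvInnerA]
    have hn : (i : Int) < (n : Int) := by exact_mod_cast hi
    have hlw : lw < 0 := by omega
    rcases pvNxt_ge ta n i with hge | heq
    · rw [if_neg]; rintro ⟨_, h2⟩
      have : (i : Int) ≤ (pvNxt ta n i : Int) := by exact_mod_cast hge
      omega
    · rw [heq, if_neg]; rintro ⟨h1, _⟩; omega
  · rw [not_le] at hle
    have hn : (i : Int) < (n : Int) := by exact_mod_cast hi
    have hmn : mI ≤ (n : Int) := min_le_right _ _
    set m : Nat := mI.toNat with hm
    have him : i < m := by omega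
    have hmle : m ≤ n := by omega
    have hik : i + (mI - (i : Int)).toNat = m := by omega
    rw [pvInnerA_eq, hik, pvFindUpTo_trunc ta n m hmle (n - i) i rfl]
    unfold pvNxt
    match hfi : pvFindUpTo ta n i with
    | some j =>
        have hj := pvFindUpTo_some ta n i j hfi
        simp only [Option.getD_some]
        have hcond : (j < m) = (j < n ∧ (j : Int) - (i : Int) ≤ lw) := by
          simp only [eq_iff_iff]
          constructor
          · intro h; constructor
            · omega
            · have h2 : (j : Int) < (m : Int) := by exact_mod_cast h
              have h3 : (m : Int) = mI := by omega
              have : (j : Int) < (i : Int) + lw + 1 :=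
                lt_of_lt_of_le (h3 ▸ h2) (min_le_left _ _)
              omega
          · rintro ⟨h1, h2⟩
            have hj1 : (j : Int) < (n : Int) := by exact_mod_cast h1
            have : (j : Int) < mI := by rw [hmI]; omega
            omega
        by_cases hjm : j < m
        · rw [if_pos hjm, if_pos (hcond ▸ hjm)]
        · rw [if_neg hjm, if_neg (by rw [← hcond]; exact hjm)]
    | none =>
        simp only [Option.getD_none]
        rw [if_neg]; rintro ⟨h1, _⟩; omega

-- ===== VERDICT (by name: the statement is the Claim_ definition above) =====
theorem mask_news_lead_ta_spec : Claim_equal_mask_news_lead_ta := by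
  intro records news_mask ta_mask lead_window _ _
  unfold Spec_mask_news_lead_ta mask_news_lead_ta mask_news_lead_ta_alt
  simp only
  apply PySem.List.foldl_congr_mem
  intro out i hi
  have hin : i < records.length := List.mem_range.mp hi
  by_cases hnm : news_mask.getD i false
  · rw [if_pos hnm, if_pos hnm]
    rw [pvStep_eq ta_mask out lead_window records.length i hin,
        pvNxt_lookup ta_mask records.length i hin]
  · rw [if_neg hnm, if_neg hnm]
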